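-- pv_equiv track=rewrite | github.com/BenStorms25/Cribbage-Game | Cribbage.py | multipleDuplicates
-- ===== SOURCE A (Python) =====
-- from collections import Counter
--
-- def multipleDuplicates(hand) -> bool:
--
--     counts = Counter(hand)
--     listOfCounts = counts.values()
--
--
--     numOfDuplicates = 0
--
--     for each in listOfCounts:
--         if(each > 1):
--             numOfDuplicates += 1
--
--
--     if numOfDuplicates > 1:
--         return True
--     else:
--         return False
-- ===== SOURCE B (Python) =====
-- def multipleDuplicates(hand) -> bool:
--     seen = set()
--     duplicated = set()
--     for card in hand:
--         if card in seen:
--             duplicated.add(card)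
--         else:
--             seen.add(card)
--     return len(duplicated) > 1
-- ===== Notes on version B (the rewrite author's own statement) =====
-- stated objective: simpler
-- what changed: Replaced Counter-then-scan-of-values with a single pass maintaining two sets (seen, duplicated) and a final size test.
import Mathlib
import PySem

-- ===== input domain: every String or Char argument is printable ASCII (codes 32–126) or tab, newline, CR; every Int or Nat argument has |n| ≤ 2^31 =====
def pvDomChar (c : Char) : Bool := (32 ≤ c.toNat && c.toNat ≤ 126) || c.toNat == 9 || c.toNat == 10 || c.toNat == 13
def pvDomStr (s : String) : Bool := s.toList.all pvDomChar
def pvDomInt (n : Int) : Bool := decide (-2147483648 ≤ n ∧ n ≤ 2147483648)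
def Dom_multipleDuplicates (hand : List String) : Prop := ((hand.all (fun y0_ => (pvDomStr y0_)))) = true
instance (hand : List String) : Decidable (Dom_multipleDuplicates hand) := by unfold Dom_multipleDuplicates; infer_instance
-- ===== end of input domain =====

-- B replaces Counter-then-scan-of-counts with a single pass maintaining two sets
-- (seen, duplicated) and a final size test: simpler, same cost.


-- ===== PORT A =====
def multipleDuplicates (hand : List String) : Bool :=
  let counts := PySem.Dict.counter hand
  let listOfCounts := counts.values
  let numOfDuplicates : Int :=
    listOfCounts.foldl (fun acc each => if each > 1 then acc + 1 else acc) 0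
  if numOfDuplicates > 1 then true else false

-- ===== PORT B =====
-- the body of Source B's loop: if card in seen then duplicated.add(card) else seen.add(card)
def pvStepB (st : PySem.Set String × PySem.Set String) (card : String) :
    PySem.Set String × PySem.Set String :=
  if PySem.Set.contains st.1 card then (st.1, PySem.Set.add st.2 card)
  else (PySem.Set.add st.1 card, st.2)

def multipleDuplicates_alt (hand : List String) : Bool :=
  let st := hand.foldl pvStepB (PySem.Set.empty, PySem.Set.empty)
  decide (PySem.Set.len st.2 > 1)

-- ===== PRECONDITION & SPEC =====
def Spec_multipleDuplicates (hand : List String) (out : Bool) : Prop := out = multipleDuplicates_alt hand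
instance (hand : List String) (out : Bool) : Decidable (Spec_multipleDuplicates hand out) := by unfold Spec_multipleDuplicates; infer_instance

-- ===== CLAIM (what is proved, stated in full; the proofs are below) =====
def Claim_equal_multipleDuplicates : Prop := ∀ (hand : List String), Dom_multipleDuplicates hand → Spec_multipleDuplicates hand (multipleDuplicates hand)

-- ===== LEMMAS AND PROOFS =====

-- For an association list with distinct keys, counting values is counting keys through getD.
lemma countP_snd_eq {κ ν : Type} [BEq κ] [LawfulBEq κ] (p : ν → Bool) (dflt : ν) :
    ∀ (l : List (κ × ν)), (l.map Prod.fst).Nodup →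
      (l.map Prod.snd).countP p
        = (l.map Prod.fst).countP (fun k => p ((PySem.Dict.mk l).getD k dflt)) := by
  intro l
  induction l with
  | nil => intro _; rfl
  | cons q rest ih =>
    intro h
    obtain ⟨k, v⟩ := q
    simp only [List.map_cons, List.nodup_cons] at h ⊢
    rw [List.countP_cons, List.countP_cons, ih h.2]
    have hhead : (PySem.Dict.mk ((k, v) :: rest)).getD k dflt = v := by
      simp [PySem.Dict.getD, PySem.Dict.get?_mk_cons]
    have htail : (rest.map Prod.fst).countP (fun k' => p ((PySem.Dict.mk rest).getD k' dflt))
        = (rest.map Prod.fst).countP (fun k' => p ((PySem.Dict.mk ((k, v) :: rest)).getD k' dflt)) := by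
      apply List.countP_congr
      intro k' hk'
      have hne : (k == k') = false := by
        simp only [List.mem_map] at hk'
        obtain ⟨q', hq', hk'eq⟩ := hk'
        refine beq_eq_false_iff_ne.mpr ?_
        intro he
        exact h.1 (he ▸ hk'eq ▸ List.mem_map_of_mem hq')
      simp [PySem.Dict.getD, PySem.Dict.get?_mk_cons, hne]
    rw [htail, hhead]

-- A's count of counter-values exceeding 1 counts the distinct elements occurring ≥ 2 times.
lemma A_count (hand : List String) :
    (PySem.Dict.counter hand).values.countP (fun v => v > 1)
      = (PySem.Set.ofList hand).countP (fun k => decide (2 ≤ hand.count k)) := by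
  have hN : ((PySem.Dict.counter hand).items.map Prod.fst).Nodup :=
    PySem.Dict.nodup_keys_counter hand
  have h0 := countP_snd_eq (fun v : Int => v > 1) 0 (PySem.Dict.counter hand).items hN
  have hmk : PySem.Dict.mk (PySem.Dict.counter hand).items = PySem.Dict.counter hand := rfl
  rw [hmk] at h0
  have hK : (PySem.Dict.counter hand).items.map Prod.fst = PySem.Set.ofList hand :=
    PySem.Dict.keys_counter hand
  calc (PySem.Dict.counter hand).values.countP (fun v => v > 1)
      = (PySem.Set.ofList hand).countP
          (fun k => decide ((PySem.Dict.counter hand).getD k 0 > 1)) := by rw [← hK]; exact h0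
    _ = (PySem.Set.ofList hand).countP (fun k => decide (2 ≤ hand.count k)) := by
        apply List.countP_congr
        intro k _
        rw [PySem.Dict.getD_counter hand k]
        simp only [decide_eq_true_eq]
        omega

-- B's loop invariant: seen = the set of the prefix; duplicated = its elements occurring ≥ 2 times.
lemma B_inv (xs : List String) :
    (xs.foldl pvStepB (PySem.Set.empty, PySem.Set.empty)).1 = PySem.Set.ofList xs ∧
    (xs.foldl pvStepB (PySem.Set.empty, PySem.Set.empty)).2.Nodup ∧
    ∀ a, a ∈ (xs.foldl pvStepB (PySem.Set.empty, PySem.Set.empty)).2 ↔ 2 ≤ xs.count a := by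
  induction xs using List.reverseRecOn with
  | nil =>
    refine ⟨rfl, List.nodup_nil, ?_⟩
    intro a
    simp [PySem.Set.empty]
  | append_singleton xs x ih =>
    obtain ⟨h1, h2, h3⟩ := ih
    rw [List.foldl_append, List.foldl_cons, List.foldl_nil]
    rw [PySem.Set.ofList_append_singleton]
    by_cases hx : x ∈ (xs.foldl pvStepB (PySem.Set.empty, PySem.Set.empty)).1
    · have hc : PySem.Set.contains (xs.foldl pvStepB (PySem.Set.empty, PySem.Set.empty)).1 x = true :=
        (PySem.Set.contains_iff _ x).mpr hx
      have hxs : x ∈ xs := (PySem.Set.mem_ofList xs x).mp (h1 ▸ hx)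
      simp only [pvStepB, hc, if_true]
      refine ⟨by rw [h1]; exact (PySem.Set.add_of_mem ((PySem.Set.mem_ofList xs x).mpr hxs)).symm,
              PySem.Set.nodup_add _ _ h2, ?_⟩
      intro a
      rw [PySem.Set.mem_add, h3 a, List.count_append, List.count_singleton]
      by_cases hax : a = x
      · subst hax
        have : 1 ≤ xs.count a := List.one_le_count_iff.mpr hxs
        simp
        omega
      · have : (x == a) = false := beq_eq_false_iff_ne.mpr (Ne.symm hax)
        simp [hax, this]
    · have hc : PySem.Set.contains (xs.foldl pvStepB (PySem.Set.empty, PySem.Set.empty)).1 x = false := by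
        simpa using (fun h => hx ((PySem.Set.contains_iff _ x).mp h))
      have hxs : x ∉ xs := fun h => hx (h1 ▸ (PySem.Set.mem_ofList xs x).mpr h)
      simp only [pvStepB, hc, Bool.false_eq_true, if_false]
      refine ⟨by rw [h1], h2, ?_⟩
      intro a
      rw [h3 a, List.count_append, List.count_singleton]
      by_cases hax : a = x
      · subst hax
        have hz : xs.count a = 0 := List.count_eq_zero.mpr hxs
        have hnm : a ∉ (xs.foldl pvStepB (PySem.Set.empty, PySem.Set.empty)).2 := by
          rw [h3 a]; omega
        simp [hz]
      · have : (x == a) = false := beq_eq_false_iff_ne.mpr (Ne.symm hax)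
        simp [this]

-- The duplicated set has exactly as many elements as A counts.
lemma B_len (hand : List String) :
    (hand.foldl pvStepB (PySem.Set.empty, PySem.Set.empty)).2.length
      = (PySem.Set.ofList hand).countP (fun k => decide (2 ≤ hand.count k)) := by
  obtain ⟨_, h2, h3⟩ := B_inv hand
  rw [List.countP_eq_length_filter]
  apply List.Perm.length_eq
  rw [List.perm_ext_iff_of_nodup h2 (List.Nodup.filter _ (PySem.Set.nodup_ofList hand))]
  intro a
  rw [h3 a, List.mem_filter, PySem.Set.mem_ofList, decide_eq_true_iff]
  constructor
  · intro h
    exact ⟨List.count_pos_iff.mp (by omega), h⟩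
  · exact fun h => h.2

-- ===== VERDICT (by name: the statement is the Claim_ definition above) =====
theorem multipleDuplicates_spec : Claim_equal_multipleDuplicates := by
  intro hand _
  show multipleDuplicates hand = multipleDuplicates_alt hand
  unfold multipleDuplicates multipleDuplicates_alt
  have hf := PySem.List.foldl_if_add_one (fun v : Int => decide (v > 1))
    (PySem.Dict.counter hand).values 0
  simp only [decide_eq_true_eq] at hf
  simp only [PySem.Set.len, hf, zero_add]
  rw [A_count hand, ← B_len hand]
  split_ifs with h
  · exact (decide_eq_true h).symm
  · exact (decide_eq_false h).symm
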